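-- pv_equiv track=rewrite | github.com/AnxoCasal/Adevent_2K22 | code/Day_17.py | jet_move
-- ===== SOURCE A (Python) =====
-- import copy
--
-- def jet_move(tunnel, direction):
--
--     go_right = direction == ">"
--
--     new_tunnel = copy.deepcopy(tunnel)
--
--     for l in range(len(new_tunnel)):
--
--         if 1 in new_tunnel[l]:
--
--             indexs_1 = [i for i, x in enumerate(new_tunnel[l]) if x == 1]
--             indexs_2 = [i for i, x in enumerate(new_tunnel[l]) if x == 2]
--
--             if 6 in indexs_1 and go_right or 0 in indexs_1 and not go_right:
--                 return tunnel
--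
--             else:
--                 if go_right:
--
--                     for i in indexs_1[::-1]:
--                         for j in indexs_2:
--                             if i == j-1:
--                                 return tunnel
--
--                         new_tunnel[l][i] = 0
--                         new_tunnel[l][i+1] = 1
--
--                 else:
--
--                     for i in indexs_1:
--                         for j in indexs_2:
--                             if i == j+1:
--                                 return tunnel
--
--                         new_tunnel[l][i] = 0
--                         new_tunnel[l][i-1] = 1
--
--
--     return new_tunnel
-- ===== SOURCE B (Python) =====
-- import copy
--
-- def jet_move(tunnel, direction):
--     dcol = 1 if direction == ">" else -1
--     edge = 6 if direction == ">" else 0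
--     rocks = [(r, c) for r, row in enumerate(tunnel) for c, v in enumerate(row) if v == 1]
--     walls = {(r, c) for r, row in enumerate(tunnel) for c, v in enumerate(row) if v == 2}
--     if any(c == edge or (r, c + dcol) in walls for r, c in rocks):
--         return tunnel
--     new_tunnel = copy.deepcopy(tunnel)
--     for r, c in rocks:
--         new_tunnel[r][c] = 0
--     for r, c in rocks:
--         new_tunnel[r][c + dcol] = 1
--     return new_tunnel
-- ===== Notes on version B (the rewrite author's own statement) =====
-- stated objective: simpler
-- what changed: A's interleaved per-row mutate-with-early-return loops are replaced by one scan gathering all rock and wall coordinates, a single validate pass (edge column or adjacent wall blocks), and a clear-all-then-set-all apply pass.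
-- outside the precondition, e.g. on jet_move([[1, 2], [1]], '>'): A returns [[1, 2], [1]], B returns [[1, 2], [1]]
import Mathlib
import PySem

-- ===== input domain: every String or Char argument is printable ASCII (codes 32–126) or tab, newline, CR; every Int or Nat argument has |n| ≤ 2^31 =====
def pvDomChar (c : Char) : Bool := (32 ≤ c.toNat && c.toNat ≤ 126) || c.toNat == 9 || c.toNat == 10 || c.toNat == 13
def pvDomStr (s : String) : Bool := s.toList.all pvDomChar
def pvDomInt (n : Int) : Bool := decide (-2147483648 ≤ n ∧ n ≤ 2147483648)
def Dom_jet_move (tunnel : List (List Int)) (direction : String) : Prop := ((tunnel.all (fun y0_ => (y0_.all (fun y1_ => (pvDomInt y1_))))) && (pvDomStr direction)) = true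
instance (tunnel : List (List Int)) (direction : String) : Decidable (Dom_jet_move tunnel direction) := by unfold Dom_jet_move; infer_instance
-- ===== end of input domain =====

-- B replaces A's interleaved per-row mutate-with-early-return loops by one coordinate scan,
-- a validate pass and a clear-then-set apply pass (simpler decomposition; return value only,
-- neither implementation mutates its argument).

-- ===== PORT A =====
-- [i for i, x in enumerate(row) if x == v]
def pvIdxOf (row : List Int) (v : Int) : List Int :=
  (PySem.List.enumerate row 0).filterMap (fun p => if p.2 = v then some p.1 else none)

-- the inner 'for i in indexs_1[::-1]' loop (right move): early return on wall collision
def pvScanR (idxs walls : List Int) (row : List Int) : Option (List Int) :=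
  match idxs with
  | [] => some row
  | i :: rest =>
    if walls.any (fun j => i == j - 1) then none
    else pvScanR rest walls (PySem.List.pySetD (PySem.List.pySetD row i 0) (i + 1) 1)

-- the inner 'for i in indexs_1' loop (left move)
def pvScanL (idxs walls : List Int) (row : List Int) : Option (List Int) :=
  match idxs with
  | [] => some row
  | i :: rest =>
    if walls.any (fun j => i == j + 1) then none
    else pvScanL rest walls (PySem.List.pySetD (PySem.List.pySetD row i 0) (i - 1) 1)

-- the 'for l in range(len(new_tunnel))' loop; none = an early 'return tunnel'
def pvRows (goRight : Bool) (rows : List (List Int)) : Option (List (List Int)) :=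
  match rows with
  | [] => some []
  | row :: rest =>
    if (1 : Int) ∈ row then
      let i1 := pvIdxOf row 1
      let i2 := pvIdxOf row 2
      if (i1.contains 6 && goRight) || (i1.contains 0 && !goRight) then none
      else
        match (if goRight then pvScanR i1.reverse i2 row else pvScanL i1 i2 row) with
        | none => none
        | some row' => (pvRows goRight rest).map (row' :: ·)
    else (pvRows goRight rest).map (row :: ·)

def jet_move (tunnel : List (List Int)) (direction : String) : List (List Int) :=
  let goRight := direction == ">"
  match pvRows goRight tunnel with
  | none => tunnel
  | some t => t

-- ===== PORT B =====
-- [(r, c) for r, row in enumerate(tunnel) for c, x in enumerate(row) if x == v]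
def pvCells (t : List (List Int)) (v : Int) : List (Int × Int) :=
  (PySem.List.enumerate t 0).flatMap (fun rp =>
    (PySem.List.enumerate rp.2 0).filterMap (fun cp => if cp.2 = v then some (rp.1, cp.1) else none))

-- new_tunnel[r][c] = v
def pvSetCell (t : List (List Int)) (r c v : Int) : List (List Int) :=
  PySem.List.pySetD t r (PySem.List.pySetD (PySem.List.pyGetD t r []) c v)

def jet_move_alt (tunnel : List (List Int)) (direction : String) : List (List Int) :=
  let dcol : Int := if direction == ">" then 1 else -1
  let edge : Int := if direction == ">" then 6 else 0
  let rocks := pvCells tunnel 1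
  let walls : PySem.Set (Int × Int) := PySem.Set.ofList (pvCells tunnel 2)
  if rocks.any (fun p => p.2 == edge || PySem.Set.contains walls (p.1, p.2 + dcol)) then tunnel
  else
    let cleared := rocks.foldl (fun t p => pvSetCell t p.1 p.2 0) tunnel
    rocks.foldl (fun t p => pvSetCell t p.1 (p.2 + dcol) 1) cleared

-- ===== PRECONDITION & SPEC =====
-- Pre_ excludes inputs where, moving right ('>'), some row holds a rock (1) at an index i with
-- i+1 ≥ row length and i ≠ 6: there A (and B) raise IndexError writing past the row end; a few
-- such inputs are excluded although A still returns, because another row blocks the move first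
-- (see the cite in the claim) — the condition is per-cell and does not re-run the algorithm.
def Pre_jet_move (tunnel : List (List Int)) (direction : String) : Prop :=
  direction = ">" → ∀ row ∈ tunnel, ∀ p ∈ PySem.List.enumerate row 0,
    p.2 = 1 → p.1 + 1 < (row.length : Int) ∨ p.1 = 6
instance (tunnel : List (List Int)) (direction : String) : Decidable (Pre_jet_move tunnel direction) := by
  unfold Pre_jet_move; infer_instance

def pvWitness_jet_move : List (List Int) × String := ([[0, 1, 0, 0, 2, 0, 0], [0, 0, 0, 1, 0, 0, 0]], ">")

def Spec_jet_move (tunnel : List (List Int)) (direction : String) (out : List (List Int)) : Prop := out = jet_move_alt tunnel direction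
instance (tunnel : List (List Int)) (direction : String) (out : List (List Int)) : Decidable (Spec_jet_move tunnel direction out) := by unfold Spec_jet_move; infer_instance

-- ===== CLAIM (what is proved, stated in full; the proofs are below) =====
def Claim_equal_jet_move : Prop := ∀ (tunnel : List (List Int)) (direction : String), Dom_jet_move tunnel direction → Pre_jet_move tunnel direction → Spec_jet_move tunnel direction (jet_move tunnel direction)

-- ===== LEMMAS AND PROOFS =====

-- 'row has value v at Int index j' (in range, no wrap)
def cellB (row : List Int) (j v : Int) : Bool :=
  decide (0 ≤ j) && decide (j < (row.length : Int)) && (PySem.List.pyGetD row j 0 == v)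

-- the value both programs produce per row on an unblocked move by dcol
def specRow (dcol : Int) (row : List Int) : List Int :=
  row.mapIdx (fun k x => if cellB row ((k : Int) - dcol) 1 then 1 else if x = 1 then 0 else x)

-- a row blocks the move (rock at the edge column or a wall ahead of a rock)
def blockedRowB (dcol edge : Int) (row : List Int) : Bool :=
  (pvIdxOf row 1).any (fun j => j == edge || cellB row (j + dcol) 2)

theorem cellB_eq_true_iff {row : List Int} {j v : Int} :
    cellB row j v = true ↔ 0 ≤ j ∧ j < (row.length : Int) ∧ PySem.List.pyGetD row j 0 = v := by
  unfold cellB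
  simp [and_assoc]

theorem cellB_coe {row : List Int} {k : Nat} (hk : k < row.length) {v : Int} :
    cellB row (k : Int) v = true ↔ row[k] = v := by
  rw [cellB_eq_true_iff]
  constructor
  · rintro ⟨h0, h1, hv⟩
    rw [PySem.List.pyGetD_eq_getElem row 0 h0 h1] at hv
    simpa using hv
  · intro hv
    refine ⟨by positivity, by exact_mod_cast hk, ?_⟩
    rw [PySem.List.pyGetD_eq_getElem row 0 (by positivity) (by exact_mod_cast hk)]
    simpa using hv

theorem mem_pvIdxOf {row : List Int} {v j : Int} : j ∈ pvIdxOf row v ↔ cellB row j v = true := by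
  have h1 : j ∈ pvIdxOf row v ↔ ∃ k : Nat, ∃ _ : k < row.length, j = (k : Int) ∧ row[k] = v := by
    unfold pvIdxOf
    rw [List.mem_filterMap]
    constructor
    · rintro ⟨p, hp, hf⟩
      rw [PySem.List.mem_enumerate_iff] at hp
      obtain ⟨k, hk, rfl⟩ := hp
      simp only [zero_add] at hf
      split at hf
      · exact ⟨k, hk, by simpa using hf.symm, by assumption⟩
      · exact absurd hf (by simp)
    · rintro ⟨k, hk, rfl, hv⟩
      refine ⟨((k : Int), row[k]), ?_, by simp [hv]⟩
      rw [PySem.List.mem_enumerate_iff]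
      exact ⟨k, hk, by simp⟩
  rw [h1]
  constructor
  · rintro ⟨k, hk, rfl, hv⟩
    exact (cellB_coe hk).mpr hv
  · intro h
    have h' := cellB_eq_true_iff.mp h
    obtain ⟨h0, hlt, hv⟩ := h'
    refine ⟨j.toNat, by omega, by omega, ?_⟩
    rw [PySem.List.pyGetD_eq_getElem row 0 h0 hlt] at hv
    exact hv

theorem pairwise_pvIdxOf (row : List Int) (v : Int) : (pvIdxOf row v).Pairwise (· < ·) := by
  unfold pvIdxOf
  rw [List.pairwise_filterMap]
  refine (PySem.List.pairwise_lt_enumerate row 0).imp ?_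
  intro p q hpq x hx y hy
  have hx' : x = p.1 := by split at hx <;> simp_all
  have hy' : y = q.1 := by split at hy <;> simp_all
  simpa [hx', hy'] using hpq

theorem pvScanR_eq (idxs walls : List Int) (row : List Int) :
    pvScanR idxs walls row =
      if idxs.any (fun i => walls.any (fun j => i == j - 1)) then none
      else some (idxs.foldl (fun r i => PySem.List.pySetD (PySem.List.pySetD r i 0) (i + 1) 1) row) := by
  induction idxs generalizing row with
  | nil => simp [pvScanR]
  | cons i rest ih =>
    by_cases hc : walls.any (fun j => i == j - 1)
    · simp [pvScanR, hc]
    · simp only [Bool.not_eq_true] at hc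
      simp only [pvScanR]
      rw [if_neg (by simp [hc]), ih, List.any_cons, hc, Bool.false_or, List.foldl_cons]

theorem pvScanL_eq (idxs walls : List Int) (row : List Int) :
    pvScanL idxs walls row =
      if idxs.any (fun i => walls.any (fun j => i == j + 1)) then none
      else some (idxs.foldl (fun r i => PySem.List.pySetD (PySem.List.pySetD r i 0) (i - 1) 1) row) := by
  induction idxs generalizing row with
  | nil => simp [pvScanL]
  | cons i rest ih =>
    by_cases hc : walls.any (fun j => i == j + 1)
    · simp [pvScanL, hc]
    · simp only [Bool.not_eq_true] at hc
      simp only [pvScanL]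
      rw [if_neg (by simp [hc]), ih, List.any_cons, hc, Bool.false_or, List.foldl_cons]

-- A's interleaved descending right-move fold, pointwise
theorem foldR_getElem (idxs : List Int) (row : List Int)
    (hs : idxs.Pairwise (· > ·))
    (hin : ∀ i ∈ idxs, 0 ≤ i ∧ i + 1 < (row.length : Int)) (k : Nat) :
    (idxs.foldl (fun r i => PySem.List.pySetD (PySem.List.pySetD r i 0) (i + 1) 1) row)[k]? =
      if (k : Int) - 1 ∈ idxs then some 1 else if (k : Int) ∈ idxs then some 0 else row[k]? := by
  induction idxs generalizing row with
  | nil => simp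
  | cons i rest ih =>
    obtain ⟨h0, h1⟩ := hin i (List.mem_cons_self ..)
    have hgt : ∀ j ∈ rest, j < i := fun j hj => (List.pairwise_cons.mp hs).1 j hj
    have hrest := (List.pairwise_cons.mp hs).2
    have hlen : (PySem.List.pySetD (PySem.List.pySetD row i 0) (i + 1) 1).length = row.length := by
      simp [PySem.List.length_pySetD]
    rw [List.foldl_cons, ih _ hrest (fun j hj => by rw [hlen]; exact hin j (List.mem_cons_of_mem _ hj))]
    rw [PySem.List.pySetD_of_nonneg _ _ h0, PySem.List.pySetD_of_nonneg _ _ (by omega)]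
    by_cases hk1 : (k : Int) - 1 ∈ rest
    · simp [hk1, List.mem_cons]
    · by_cases hk2 : (k : Int) ∈ rest
      · have hki : ¬ ((k : Int) - 1 = i) := by have := hgt _ hk2; omega
        simp [hk1, hk2, List.mem_cons, hki]
      · simp only [List.mem_cons, hk1, hk2, or_false]
        rw [List.getElem?_set, List.getElem?_set]
        by_cases e1 : (k : Int) - 1 = i
        · rw [if_pos (show (i + 1).toNat = k by omega),
              if_pos (show (i + 1).toNat < (row.set i.toNat 0).length by rw [List.length_set]; omega),
              if_pos e1]
          simp
        · by_cases e2 : (k : Int) = i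
          · rw [if_neg (show ¬ ((i + 1).toNat = k) by omega),
                if_pos (show i.toNat = k by omega),
                if_pos (show i.toNat < row.length by omega),
                if_neg e1, if_pos e2]
            simp
          · rw [if_neg (show ¬ ((i + 1).toNat = k) by omega),
                if_neg (show ¬ (i.toNat = k) by omega),
                if_neg e1, if_neg e2]
            simp

-- A's interleaved ascending left-move fold, pointwise
theorem foldL_getElem (idxs : List Int) (row : List Int)
    (hs : idxs.Pairwise (· < ·))
    (hin : ∀ i ∈ idxs, 1 ≤ i ∧ i < (row.length : Int)) (k : Nat) :
    (idxs.foldl (fun r i => PySem.List.pySetD (PySem.List.pySetD r i 0) (i - 1) 1) row)[k]? =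
      if (k : Int) + 1 ∈ idxs then some 1 else if (k : Int) ∈ idxs then some 0 else row[k]? := by
  induction idxs generalizing row with
  | nil => simp
  | cons i rest ih =>
    obtain ⟨h0, h1⟩ := hin i (List.mem_cons_self ..)
    have hlt : ∀ j ∈ rest, i < j := fun j hj => (List.pairwise_cons.mp hs).1 j hj
    have hrest := (List.pairwise_cons.mp hs).2
    have hlen : (PySem.List.pySetD (PySem.List.pySetD row i 0) (i - 1) 1).length = row.length := by
      simp [PySem.List.length_pySetD]
    rw [List.foldl_cons, ih _ hrest (fun j hj => by rw [hlen]; exact hin j (List.mem_cons_of_mem _ hj))]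
    rw [PySem.List.pySetD_of_nonneg _ _ (by omega), PySem.List.pySetD_of_nonneg _ _ (by omega)]
    by_cases hk1 : (k : Int) + 1 ∈ rest
    · simp [hk1, List.mem_cons]
    · by_cases hk2 : (k : Int) ∈ rest
      · have hki : ¬ ((k : Int) + 1 = i) := by have := hlt _ hk2; omega
        simp [hk1, hk2, List.mem_cons, hki]
      · simp only [List.mem_cons, hk1, hk2, or_false]
        rw [List.getElem?_set, List.getElem?_set]
        by_cases e1 : (k : Int) + 1 = i
        · rw [if_pos (show (i - 1).toNat = k by omega),
              if_pos (show (i - 1).toNat < (row.set i.toNat 0).length by rw [List.length_set]; omega),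
              if_pos e1]
          simp
        · by_cases e2 : (k : Int) = i
          · rw [if_neg (show ¬ ((i - 1).toNat = k) by omega),
                if_pos (show i.toNat = k by omega),
                if_pos (show i.toNat < row.length by omega),
                if_neg e1, if_pos e2]
            simp
          · rw [if_neg (show ¬ ((i - 1).toNat = k) by omega),
                if_neg (show ¬ (i.toNat = k) by omega),
                if_neg e1, if_neg e2]
            simp

-- B's clear pass per row, pointwise
theorem foldClear_getElem (idxs : List Int) (row : List Int)
    (hin : ∀ i ∈ idxs, 0 ≤ i ∧ i < (row.length : Int)) (k : Nat) :
    (idxs.foldl (fun r c => PySem.List.pySetD r c 0) row)[k]? =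
      if (k : Int) ∈ idxs then some 0 else row[k]? := by
  induction idxs generalizing row with
  | nil => simp
  | cons i rest ih =>
    obtain ⟨h0, h1⟩ := hin i (List.mem_cons_self ..)
    have hlen : (PySem.List.pySetD row i 0).length = row.length := PySem.List.length_pySetD ..
    rw [List.foldl_cons, ih _ (fun j hj => by rw [hlen]; exact hin j (List.mem_cons_of_mem _ hj))]
    rw [PySem.List.pySetD_of_nonneg _ _ h0]
    by_cases hk1 : (k : Int) ∈ rest
    · simp [hk1, List.mem_cons]
    · simp only [List.mem_cons, hk1, or_false]
      rw [List.getElem?_set]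
      by_cases e : (k : Int) = i
      · rw [if_pos (show i.toNat = k by omega),
            if_pos (show i.toNat < row.length by omega), if_pos e]
        simp
      · rw [if_neg (show ¬ (i.toNat = k) by omega), if_neg e]
        simp

-- B's set pass per row, pointwise
theorem foldSet_getElem (dcol : Int) (idxs : List Int) (row : List Int)
    (hin : ∀ i ∈ idxs, 0 ≤ i + dcol ∧ i + dcol < (row.length : Int)) (k : Nat) :
    (idxs.foldl (fun r c => PySem.List.pySetD r (c + dcol) 1) row)[k]? =
      if (k : Int) - dcol ∈ idxs then some 1 else row[k]? := by
  induction idxs generalizing row with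
  | nil => simp
  | cons i rest ih =>
    obtain ⟨h0, h1⟩ := hin i (List.mem_cons_self ..)
    have hlen : (PySem.List.pySetD row (i + dcol) 1).length = row.length := PySem.List.length_pySetD ..
    rw [List.foldl_cons, ih _ (fun j hj => by rw [hlen]; exact hin j (List.mem_cons_of_mem _ hj))]
    rw [PySem.List.pySetD_of_nonneg _ _ h0]
    by_cases hk1 : (k : Int) - dcol ∈ rest
    · simp [hk1, List.mem_cons]
    · simp only [List.mem_cons, hk1, or_false]
      rw [List.getElem?_set]
      by_cases e : (k : Int) - dcol = i
      · rw [if_pos (show (i + dcol).toNat = k by omega),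
            if_pos (show (i + dcol).toNat < row.length by omega), if_pos e]
        simp
      · rw [if_neg (show ¬ ((i + dcol).toNat = k) by omega), if_neg e]
        simp

theorem specRow_getElem (dcol : Int) (row : List Int) (k : Nat) :
    (specRow dcol row)[k]? =
      row[k]?.map (fun x => if cellB row ((k : Int) - dcol) 1 then 1 else if x = 1 then 0 else x) := by
  unfold specRow
  rw [List.getElem?_mapIdx]

-- per-row A = spec, right move
theorem rowR_eq (row : List Int)
    (hpre : ∀ p ∈ PySem.List.enumerate row 0, p.2 = 1 → p.1 + 1 < (row.length : Int) ∨ p.1 = 6)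
    (h6 : ¬ (6 : Int) ∈ pvIdxOf row 1)
    (hnb : (pvIdxOf row 1).any (fun i => (pvIdxOf row 2).any (fun j => i == j - 1)) = false) :
    pvScanR (pvIdxOf row 1).reverse (pvIdxOf row 2) row = some (specRow 1 row) := by
  rw [pvScanR_eq, List.any_reverse, hnb, if_neg Bool.false_ne_true]
  congr 1
  have hin : ∀ i ∈ (pvIdxOf row 1).reverse, 0 ≤ i ∧ i + 1 < (row.length : Int) := by
    intro i hi
    rw [List.mem_reverse] at hi
    have hc := cellB_eq_true_iff.mp (mem_pvIdxOf.mp hi)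
    obtain ⟨hi0, hilen, hiv⟩ := hc
    refine ⟨hi0, ?_⟩
    have hmem : ((i, row[i.toNat]) : Int × Int) ∈ PySem.List.enumerate row 0 := by
      rw [PySem.List.mem_enumerate_iff]
      exact ⟨i.toNat, by omega, by simp; omega⟩
    have h2 : row[i.toNat] = 1 := by
      rw [← PySem.List.pyGetD_eq_getElem row 0 hi0 hilen]; exact hiv
    rcases hpre _ hmem h2 with h | h
    · exact h
    · exact absurd (h ▸ hi) h6
  apply List.ext_getElem?
  intro k
  rw [foldR_getElem _ _ (List.pairwise_reverse.mpr (by simpa using pairwise_pvIdxOf row 1)) hin k,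
      specRow_getElem]
  by_cases hk : k < row.length
  · rw [List.getElem?_eq_getElem hk, Option.map_some]
    by_cases hc1 : cellB row ((k : Int) - 1) 1
    · rw [if_pos (List.mem_reverse.mpr (mem_pvIdxOf.mpr hc1)), if_pos hc1]
    · rw [if_neg (fun h => hc1 (mem_pvIdxOf.mp (List.mem_reverse.mp h)))]
      by_cases hc2 : row[k] = 1
      · rw [if_pos (List.mem_reverse.mpr (mem_pvIdxOf.mpr ((cellB_coe hk).mpr hc2))),
            if_neg hc1, if_pos hc2]
      · rw [if_neg (fun h => hc2 ((cellB_coe hk).mp (mem_pvIdxOf.mp (List.mem_reverse.mp h)))),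
            if_neg hc1, if_neg hc2]
  · have h1 : ¬ ((k : Int) - 1 ∈ (pvIdxOf row 1).reverse) := fun h => by
      have := (hin _ h).2; omega
    have h2 : ¬ ((k : Int) ∈ (pvIdxOf row 1).reverse) := fun h => by
      have := (hin _ h).2; omega
    rw [if_neg h1, if_neg h2, List.getElem?_eq_none (show row.length ≤ k by omega)]
    rfl

-- per-row A = spec, left move
theorem rowL_eq (row : List Int)
    (h0 : ¬ (0 : Int) ∈ pvIdxOf row 1)
    (hnb : (pvIdxOf row 1).any (fun i => (pvIdxOf row 2).any (fun j => i == j + 1)) = false) :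
    pvScanL (pvIdxOf row 1) (pvIdxOf row 2) row = some (specRow (-1) row) := by
  rw [pvScanL_eq, hnb, if_neg Bool.false_ne_true]
  congr 1
  have hin : ∀ i ∈ pvIdxOf row 1, 1 ≤ i ∧ i < (row.length : Int) := by
    intro i hi
    have hc := cellB_eq_true_iff.mp (mem_pvIdxOf.mp hi)
    obtain ⟨hi0, hilen, _⟩ := hc
    refine ⟨?_, hilen⟩
    rcases eq_or_lt_of_le hi0 with h | h
    · exact absurd (h ▸ hi) h0
    · omega
  apply List.ext_getElem?
  intro k
  rw [foldL_getElem _ _ (pairwise_pvIdxOf row 1) hin k, specRow_getElem,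
      show ((k : Int) - -1) = ((k : Int) + 1) from by ring]
  by_cases hk : k < row.length
  · rw [List.getElem?_eq_getElem hk, Option.map_some]
    by_cases hc1 : cellB row ((k : Int) + 1) 1
    · rw [if_pos (mem_pvIdxOf.mpr hc1), if_pos hc1]
    · rw [if_neg (fun h => hc1 (mem_pvIdxOf.mp h))]
      by_cases hc2 : row[k] = 1
      · rw [if_pos (mem_pvIdxOf.mpr ((cellB_coe hk).mpr hc2)), if_neg hc1, if_pos hc2]
      · rw [if_neg (fun h => hc2 ((cellB_coe hk).mp (mem_pvIdxOf.mp h))),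
            if_neg hc1, if_neg hc2]
  · have h1 : ¬ ((k : Int) + 1 ∈ pvIdxOf row 1) := fun h => by
      have := (hin _ h).2; omega
    have h2 : ¬ ((k : Int) ∈ pvIdxOf row 1) := fun h => by
      have := (hin _ h).2; omega
    rw [if_neg h1, if_neg h2, List.getElem?_eq_none (show row.length ≤ k by omega)]
    rfl

theorem specRow_no_rock (dcol : Int) (row : List Int) (h : (1 : Int) ∉ row) :
    specRow dcol row = row := by
  apply List.ext_getElem?
  intro k
  rw [specRow_getElem]
  cases hg : row[k]? with
  | none => rfl
  | some x =>
    have hx : x ∈ row := List.mem_of_getElem? hg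
    have hcell : ¬ (cellB row ((k : Int) - dcol) 1 = true) := by
      intro hc
      rw [cellB_eq_true_iff] at hc
      obtain ⟨hc0, hc1, hv⟩ := hc
      exact h (hv ▸ PySem.List.pyGetD_mem row 0 (by constructor <;> omega))
    have hx1 : ¬ (x = 1) := fun hh => h (hh ▸ hx)
    simp [hcell, hx1]

theorem pvIdxOf_no_rock (row : List Int) (h : (1 : Int) ∉ row) : pvIdxOf row 1 = [] := by
  rw [List.eq_nil_iff_forall_not_mem]
  intro j hj
  rw [mem_pvIdxOf, cellB_eq_true_iff] at hj
  obtain ⟨h0, h1, hv⟩ := hj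
  exact h (hv ▸ PySem.List.pyGetD_mem row 0 (by constructor <;> omega))

theorem blockedRowB_iff (dcol edge : Int) (row : List Int) :
    blockedRowB dcol edge row = true ↔
      ∃ i ∈ pvIdxOf row 1, i = edge ∨ cellB row (i + dcol) 2 = true := by
  unfold blockedRowB
  rw [List.any_eq_true]
  constructor
  · rintro ⟨i, hi, hc⟩
    refine ⟨i, hi, ?_⟩
    rcases Bool.or_eq_true_iff.mp hc with h | h
    · exact Or.inl (by simpa using h)
    · exact Or.inr h
  · rintro ⟨i, hi, hc⟩
    refine ⟨i, hi, Bool.or_eq_true_iff.mpr ?_⟩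
    rcases hc with h | h
    · exact Or.inl (by simpa using h)
    · exact Or.inr h

-- one-step unfolding of A's row loop, right move
theorem pvRows_cons_true (row : List Int) (rest : List (List Int)) :
    pvRows true (row :: rest) =
      if (1 : Int) ∈ row then
        (if (pvIdxOf row 1).contains 6 then none
         else match pvScanR (pvIdxOf row 1).reverse (pvIdxOf row 2) row with
           | none => none
           | some row' => (pvRows true rest).map (row' :: ·))
      else (pvRows true rest).map (row :: ·) := by
  simp only [pvRows, Bool.and_true, Bool.not_true, Bool.and_false, Bool.or_false, if_true]

-- one-step unfolding of A's row loop, left move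
theorem pvRows_cons_false (row : List Int) (rest : List (List Int)) :
    pvRows false (row :: rest) =
      if (1 : Int) ∈ row then
        (if (pvIdxOf row 1).contains 0 then none
         else match pvScanL (pvIdxOf row 1) (pvIdxOf row 2) row with
           | none => none
           | some row' => (pvRows false rest).map (row' :: ·))
      else (pvRows false rest).map (row :: ·) := by
  simp only [pvRows, Bool.and_false, Bool.not_false, Bool.and_true, Bool.false_or,
    Bool.false_eq_true, if_false]

-- A's row loop = blocked-check + map specRow
theorem pvRows_eq (goRight : Bool) (rows : List (List Int))
    (hpre : goRight = true → ∀ row ∈ rows, ∀ p ∈ PySem.List.enumerate row 0,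
      p.2 = 1 → p.1 + 1 < (row.length : Int) ∨ p.1 = 6) :
    pvRows goRight rows =
      if rows.any (blockedRowB (if goRight then 1 else -1) (if goRight then 6 else 0))
      then none else some (rows.map (specRow (if goRight then 1 else -1))) := by
  induction rows with
  | nil => simp [pvRows]
  | cons row rest ih =>
    have hpre' : goRight = true → ∀ r ∈ rest, ∀ p ∈ PySem.List.enumerate r 0,
        p.2 = 1 → p.1 + 1 < (r.length : Int) ∨ p.1 = 6 :=
      fun hg r hr => hpre hg r (List.mem_cons_of_mem _ hr)
    have ih' := ih hpre'
    by_cases hrock : (1 : Int) ∈ row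
    · cases goRight with
      | true =>
        rw [show (if (true : Bool) = true then (1 : Int) else -1) = 1 from rfl,
            show (if (true : Bool) = true then (6 : Int) else 0) = 6 from rfl] at ih' ⊢
        rw [pvRows_cons_true, if_pos hrock]
        by_cases hc6 : (pvIdxOf row 1).contains 6
        · have hb : blockedRowB 1 6 row = true :=
            (blockedRowB_iff 1 6 row).mpr ⟨6, List.contains_iff_mem.mp hc6, Or.inl rfl⟩
          rw [if_pos hc6, List.any_cons, hb, Bool.true_or, if_pos rfl]
        · rw [if_neg hc6]
          by_cases hcol : (pvIdxOf row 1).any (fun i => (pvIdxOf row 2).any (fun j => i == j - 1))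
          · have hnone : pvScanR (pvIdxOf row 1).reverse (pvIdxOf row 2) row = none := by
              rw [pvScanR_eq, List.any_reverse, if_pos hcol]
            have hb : blockedRowB 1 6 row = true := by
              rw [List.any_eq_true] at hcol
              obtain ⟨i, hi, hc⟩ := hcol
              rw [List.any_eq_true] at hc
              obtain ⟨j, hj, he⟩ := hc
              have he' : i = j - 1 := by simpa using he
              refine (blockedRowB_iff 1 6 row).mpr ⟨i, hi, Or.inr ?_⟩
              rw [← mem_pvIdxOf, show i + 1 = j from by omega]
              exact hj
            rw [hnone, List.any_cons, hb, Bool.true_or, if_pos rfl]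
          · have h6 : ¬ (6 : Int) ∈ pvIdxOf row 1 :=
              fun h => hc6 (List.contains_iff_mem.mpr h)
            have hsome := rowR_eq row (hpre rfl row (List.mem_cons_self ..)) h6
              (Bool.eq_false_iff.mpr hcol)
            have hb : blockedRowB 1 6 row = false := by
              rw [Bool.eq_false_iff]
              intro hbt
              obtain ⟨i, hi, hc⟩ := (blockedRowB_iff 1 6 row).mp hbt
              rcases hc with h | h
              · exact h6 (h ▸ hi)
              · rw [← mem_pvIdxOf] at h
                exact hcol (List.any_eq_true.mpr ⟨i, hi, List.any_eq_true.mpr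
                  ⟨i + 1, h, by simp⟩⟩)
            rw [hsome, ih', List.any_cons, hb, Bool.false_or]
            by_cases hr : rest.any (blockedRowB 1 6)
            · simp [hr]
            · simp only [Bool.not_eq_true] at hr
              simp [hr]
      | false =>
        rw [show (if (false : Bool) = true then (1 : Int) else -1) = -1 from rfl,
            show (if (false : Bool) = true then (6 : Int) else 0) = 0 from rfl] at ih' ⊢
        rw [pvRows_cons_false, if_pos hrock]
        by_cases hc0 : (pvIdxOf row 1).contains 0
        · have hb : blockedRowB (-1) 0 row = true :=
            (blockedRowB_iff (-1) 0 row).mpr ⟨0, List.contains_iff_mem.mp hc0, Or.inl rfl⟩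
          rw [if_pos hc0, List.any_cons, hb, Bool.true_or, if_pos rfl]
        · rw [if_neg hc0]
          by_cases hcol : (pvIdxOf row 1).any (fun i => (pvIdxOf row 2).any (fun j => i == j + 1))
          · have hnone : pvScanL (pvIdxOf row 1) (pvIdxOf row 2) row = none := by
              rw [pvScanL_eq, if_pos hcol]
            have hb : blockedRowB (-1) 0 row = true := by
              rw [List.any_eq_true] at hcol
              obtain ⟨i, hi, hc⟩ := hcol
              rw [List.any_eq_true] at hc
              obtain ⟨j, hj, he⟩ := hc
              have he' : i = j + 1 := by simpa using he
              refine (blockedRowB_iff (-1) 0 row).mpr ⟨i, hi, Or.inr ?_⟩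
              rw [← mem_pvIdxOf, show i + -1 = j from by omega]
              exact hj
            rw [hnone, List.any_cons, hb, Bool.true_or, if_pos rfl]
          · have h0 : ¬ (0 : Int) ∈ pvIdxOf row 1 :=
              fun h => hc0 (List.contains_iff_mem.mpr h)
            have hsome := rowL_eq row h0 (Bool.eq_false_iff.mpr hcol)
            have hb : blockedRowB (-1) 0 row = false := by
              rw [Bool.eq_false_iff]
              intro hbt
              obtain ⟨i, hi, hc⟩ := (blockedRowB_iff (-1) 0 row).mp hbt
              rcases hc with h | h
              · exact h0 (h ▸ hi)
              · rw [← mem_pvIdxOf] at h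
                exact hcol (List.any_eq_true.mpr ⟨i, hi, List.any_eq_true.mpr
                  ⟨i + -1, h, by simp⟩⟩)
            rw [hsome, ih', List.any_cons, hb, Bool.false_or]
            by_cases hr : rest.any (blockedRowB (-1) 0)
            · simp [hr]
            · simp only [Bool.not_eq_true] at hr
              simp [hr]
    · cases goRight with
      | true =>
        rw [show (if (true : Bool) = true then (1 : Int) else -1) = 1 from rfl,
            show (if (true : Bool) = true then (6 : Int) else 0) = 6 from rfl] at ih' ⊢
        have hb : blockedRowB 1 6 row = false := by
          unfold blockedRowB
          rw [pvIdxOf_no_rock row hrock]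
          rfl
        have hs : specRow (1 : Int) row = row := specRow_no_rock _ row hrock
        rw [pvRows_cons_true, if_neg hrock, ih', List.any_cons, hb, Bool.false_or]
        by_cases hr : rest.any (blockedRowB 1 6)
        · simp [hr]
        · simp only [Bool.not_eq_true] at hr
          simp [hr, hs]
      | false =>
        rw [show (if (false : Bool) = true then (1 : Int) else -1) = -1 from rfl,
            show (if (false : Bool) = true then (6 : Int) else 0) = 0 from rfl] at ih' ⊢
        have hb : blockedRowB (-1) 0 row = false := by
          unfold blockedRowB
          rw [pvIdxOf_no_rock row hrock]
          rfl
        have hs : specRow (-1 : Int) row = row := specRow_no_rock _ row hrock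
        rw [pvRows_cons_false, if_neg hrock, ih', List.any_cons, hb, Bool.false_or]
        by_cases hr : rest.any (blockedRowB (-1) 0)
        · simp [hr]
        · simp only [Bool.not_eq_true] at hr
          simp [hr, hs]

-- membership of the coordinate scan
theorem mem_pvCells {t : List (List Int)} {v : Int} {p : Int × Int} :
    p ∈ pvCells t v ↔ ∃ k : Nat, ∃ _ : k < t.length, p.1 = (k : Int) ∧ cellB t[k] p.2 v = true := by
  unfold pvCells
  rw [List.mem_flatMap]
  constructor
  · rintro ⟨rp, hrp, hin⟩
    rw [PySem.List.mem_enumerate_iff] at hrp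
    obtain ⟨k, hk, rfl⟩ := hrp
    rw [List.mem_filterMap] at hin
    obtain ⟨cp, hcp, hf⟩ := hin
    rw [PySem.List.mem_enumerate_iff] at hcp
    obtain ⟨c, hc, rfl⟩ := hcp
    simp only [zero_add] at hf
    split at hf
    · rename_i hv
      obtain rfl := Option.some.inj hf
      exact ⟨k, hk, rfl, (cellB_coe hc).mpr hv⟩
    · exact absurd hf (by simp)
  · rintro ⟨k, hk, h1, h2⟩
    have h2' := cellB_eq_true_iff.mp h2
    obtain ⟨h0, hlt, hv⟩ := h2'
    refine ⟨((k : Int), t[k]), ?_, ?_⟩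
    · rw [PySem.List.mem_enumerate_iff]
      exact ⟨k, hk, by simp⟩
    · rw [List.mem_filterMap]
      refine ⟨(p.2, PySem.List.pyGetD t[k] p.2 0), ?_, ?_⟩
      · rw [PySem.List.mem_enumerate_iff]
        refine ⟨p.2.toNat, (by omega : p.2.toNat < t[k].length), ?_⟩
        rw [PySem.List.pyGetD_eq_getElem _ 0 h0 hlt,
            show (0 : Int) + (p.2.toNat : Int) = p.2 from by omega]
      · rw [if_pos hv, show ((k : Int), p.2) = p from Prod.ext h1.symm rfl]

-- B's blocked test = rowwise blocked test
theorem alt_blocked_eq (t : List (List Int)) (dcol edge : Int) :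
    ((pvCells t 1).any (fun p => p.2 == edge || PySem.Set.contains (PySem.Set.ofList (pvCells t 2)) (p.1, p.2 + dcol)))
      = t.any (blockedRowB dcol edge) := by
  rw [Bool.eq_iff_iff, List.any_eq_true, List.any_eq_true]
  have hwall : ∀ (q : Int × Int),
      PySem.Set.contains (PySem.Set.ofList (pvCells t 2)) q = true ↔ q ∈ pvCells t 2 := by
    intro q
    unfold PySem.Set.contains
    rw [List.contains_iff_mem, PySem.Set.mem_ofList]
  constructor
  · rintro ⟨p, hp, hc⟩
    obtain ⟨k, hk, hp1, hp2⟩ := mem_pvCells.mp hp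
    refine ⟨t[k], List.getElem_mem hk, ?_⟩
    rw [blockedRowB_iff]
    refine ⟨p.2, mem_pvIdxOf.mpr hp2, ?_⟩
    rcases Bool.or_eq_true_iff.mp hc with h | h
    · exact Or.inl (by simpa using h)
    · rw [hwall] at h
      obtain ⟨k', hk', hq1, hq2⟩ := mem_pvCells.mp h
      have hkk : k' = k := by
        have : (k' : Int) = (k : Int) := by rw [← hq1, hp1]
        omega
      subst hkk
      exact Or.inr hq2
  · rintro ⟨row, hrow, hb⟩
    obtain ⟨k, hk, rfl⟩ := List.mem_iff_getElem.mp hrow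
    obtain ⟨i, hi, hc⟩ := (blockedRowB_iff dcol edge _).mp hb
    refine ⟨((k : Int), i), mem_pvCells.mpr ⟨k, hk, rfl, mem_pvIdxOf.mp hi⟩, ?_⟩
    apply Bool.or_eq_true_iff.mpr
    rcases hc with h | h
    · exact Or.inl (by simpa using h)
    · exact Or.inr ((hwall _).mpr (mem_pvCells.mpr ⟨k, hk, rfl, h⟩))

theorem length_foldl_pvSetCell (L : List (Int × Int)) (f : Int × Int → Int) (v : Int)
    (t : List (List Int)) :
    (L.foldl (fun t p => pvSetCell t p.1 (f p) v) t).length = t.length := by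
  induction L generalizing t with
  | nil => rfl
  | cons p L ih =>
    rw [List.foldl_cons, ih]
    unfold pvSetCell
    exact PySem.List.length_pySetD ..

-- a foldl of pvSetCell touches each row independently
theorem foldl_pvSetCell_getElem (L : List (Int × Int)) (f : Int × Int → Int) (v : Int)
    (t : List (List Int)) (hL : ∀ p ∈ L, 0 ≤ p.1 ∧ p.1 < (t.length : Int)) (k : Nat) :
    (L.foldl (fun t p => pvSetCell t p.1 (f p) v) t)[k]? =
      t[k]?.map (fun row => (((L.filter (fun p => p.1 == (k : Int))).map (·.2)).foldl
        (fun r c => PySem.List.pySetD r (f (((k : Int), c) : Int × Int)) v) row)) := by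
  induction L generalizing t with
  | nil => simp
  | cons p L ih =>
    obtain ⟨hp0, hp1⟩ := hL p (List.mem_cons_self ..)
    rw [List.foldl_cons, ih _ (fun q hq => by
      unfold pvSetCell
      rw [PySem.List.length_pySetD]
      exact hL q (List.mem_cons_of_mem _ hq))]
    rw [List.filter_cons]
    by_cases hpk : p.1 = (k : Int)
    · rw [if_pos (by simpa using hpk)]
      have hq : p.1.toNat = k := by omega
      subst hq
      have hkt : p.1.toNat < t.length := by omega
      have hcell : (pvSetCell t p.1 (f p) v)[p.1.toNat]? =
          some (PySem.List.pySetD t[p.1.toNat] (f p) v) := by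
        unfold pvSetCell
        rw [PySem.List.pyGetD_eq_getElem t [] hp0 hp1, PySem.List.pySetD_of_nonneg _ _ hp0,
            List.getElem?_set, if_pos rfl, if_pos hkt]
      rw [hcell, List.getElem?_eq_getElem hkt, Option.map_some, Option.map_some,
          List.map_cons, List.foldl_cons,
          show (((p.1.toNat : Nat) : Int), p.2) = p from Prod.ext (by omega) rfl]
    · rw [if_neg (by simpa using hpk)]
      have hcell : (pvSetCell t p.1 (f p) v)[k]? = t[k]? := by
        unfold pvSetCell
        rw [PySem.List.pySetD_of_nonneg _ _ hp0, List.getElem?_set,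
            if_neg (show ¬ (p.1.toNat = k) from by omega)]
      rw [hcell]

-- the rocks of row k among all rocks (generalized over the enumerate start)
theorem cells_aux (v : Int) (t : List (List Int)) : ∀ (s : Int) (k : Nat), k < t.length →
    ((((PySem.List.enumerate t s).flatMap (fun rp =>
      (PySem.List.enumerate rp.2 0).filterMap (fun cp => if cp.2 = v then some (rp.1, cp.1) else none))).filter
        (fun p => p.1 == s + (k : Int))).map (·.2)) = pvIdxOf (t.getD k []) v := by
  induction t with
  | nil => intro s k hk; simp at hk
  | cons row rest ih =>
    intro s k hk
    simp only [PySem.List.enumerate_cons, List.flatMap_cons, List.filter_append, List.map_append]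
    have hblock : ((PySem.List.enumerate row 0).filterMap
        (fun cp => if cp.2 = v then some ((s : Int), cp.1) else none))
        = (pvIdxOf row v).map (fun c => ((s : Int), c)) := by
      unfold pvIdxOf
      rw [List.map_filterMap]
      apply List.filterMap_congr
      intro cp _
      by_cases h : cp.2 = v <;> simp [h]
    rw [hblock]
    cases k with
    | zero =>
      have hbf : (((pvIdxOf row v).map (fun c => ((s : Int), c))).filter
          (fun p => p.1 == s + ((0 : Nat) : Int))) = (pvIdxOf row v).map (fun c => ((s : Int), c)) := by
        apply List.filter_eq_self.mpr
        intro p hp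
        rw [List.mem_map] at hp
        obtain ⟨c, _, rfl⟩ := hp
        simp
      have hrf : (((PySem.List.enumerate rest (s + 1)).flatMap (fun rp =>
          (PySem.List.enumerate rp.2 0).filterMap (fun cp => if cp.2 = v then some (rp.1, cp.1) else none))).filter
            (fun p => p.1 == s + ((0 : Nat) : Int))) = [] := by
        apply List.filter_eq_nil_iff.mpr
        intro p hp
        rw [List.mem_flatMap] at hp
        obtain ⟨rp, hrp, hin⟩ := hp
        rw [PySem.List.mem_enumerate_iff] at hrp
        obtain ⟨k', hk', rfl⟩ := hrp
        rw [List.mem_filterMap] at hin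
        obtain ⟨cp, _, hf⟩ := hin
        split at hf
        · obtain rfl := Option.some.inj hf
          simp
          omega
        · exact absurd hf (by simp)
      rw [hbf, hrf, List.map_nil, List.append_nil, List.map_map, List.getD_cons_zero]
      simp
    | succ k =>
      have hbf : (((pvIdxOf row v).map (fun c => ((s : Int), c))).filter
          (fun p => p.1 == s + ((k + 1 : Nat) : Int))) = [] := by
        apply List.filter_eq_nil_iff.mpr
        intro p hp
        rw [List.mem_map] at hp
        obtain ⟨c, _, rfl⟩ := hp
        simp
        omega
      have hfun : (fun p : Int × Int => p.1 == s + ((k + 1 : Nat) : Int))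
          = (fun p : Int × Int => p.1 == (s + 1) + (k : Int)) := by
        funext p
        rw [show s + ((k + 1 : Nat) : Int) = (s + 1) + (k : Int) from by push_cast; ring]
      rw [hbf, List.map_nil, List.nil_append, hfun, List.getD_cons_succ]
      exact ih (s + 1) k (by simpa using hk)

theorem pvCells_filter_row (t : List (List Int)) (v : Int) (k : Nat) (hk : k < t.length) :
    ((pvCells t v).filter (fun p => p.1 == (k : Int))).map (·.2) = pvIdxOf t[k] v := by
  have h := cells_aux v t 0 k hk
  rw [show (fun p : Int × Int => p.1 == (0 : Int) + (k : Int)) = (fun p : Int × Int => p.1 == (k : Int))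
        from by funext p; rw [zero_add],
      show t.getD k [] = t[k] from by simp [List.getD, List.getElem?_eq_getElem hk]] at h
  unfold pvCells
  exact h

theorem length_foldl_pySetD (L : List Int) (row : List Int) :
    (L.foldl (fun r c => PySem.List.pySetD r c 0) row).length = row.length := by
  induction L generalizing row with
  | nil => rfl
  | cons i L ih => rw [List.foldl_cons, ih, PySem.List.length_pySetD]

-- per-row B = spec
theorem row_apply_eq (dcol : Int) (row : List Int)
    (hb : ∀ i ∈ pvIdxOf row 1, 0 ≤ i + dcol ∧ i + dcol < (row.length : Int)) :
    (pvIdxOf row 1).foldl (fun r c => PySem.List.pySetD r (c + dcol) 1)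
      ((pvIdxOf row 1).foldl (fun r c => PySem.List.pySetD r c 0) row) = specRow dcol row := by
  have hin0 : ∀ i ∈ pvIdxOf row 1, 0 ≤ i ∧ i < (row.length : Int) := by
    intro i hi
    have := cellB_eq_true_iff.mp (mem_pvIdxOf.mp hi)
    exact ⟨this.1, this.2.1⟩
  have hlen : ((pvIdxOf row 1).foldl (fun r c => PySem.List.pySetD r c 0) row).length
      = row.length := length_foldl_pySetD ..
  apply List.ext_getElem?
  intro k
  rw [foldSet_getElem dcol _ _ (fun i hi => by rw [hlen]; exact hb i hi) k,
      foldClear_getElem _ _ hin0 k, specRow_getElem]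
  by_cases hk : k < row.length
  · rw [List.getElem?_eq_getElem hk, Option.map_some]
    by_cases h1 : (k : Int) - dcol ∈ pvIdxOf row 1
    · rw [if_pos h1, if_pos (mem_pvIdxOf.mp h1)]
    · rw [if_neg h1]
      have hcF : ¬ (cellB row ((k : Int) - dcol) 1 = true) := fun hc => h1 (mem_pvIdxOf.mpr hc)
      by_cases h2 : (k : Int) ∈ pvIdxOf row 1
      · rw [if_pos h2, if_neg hcF, if_pos ((cellB_coe hk).mp (mem_pvIdxOf.mp h2))]
      · rw [if_neg h2, if_neg hcF, if_neg (fun hh => h2 (mem_pvIdxOf.mpr ((cellB_coe hk).mpr hh)))]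
  · have h1 : ¬ ((k : Int) - dcol ∈ pvIdxOf row 1) := fun h => by
      have := (hb _ h).2; omega
    have h2 : ¬ ((k : Int) ∈ pvIdxOf row 1) := fun h => by
      have := (hin0 _ h).2; omega
    rw [if_neg h1, if_neg h2, List.getElem?_eq_none (show row.length ≤ k by omega)]
    rfl

-- B's apply passes = map specRow
theorem alt_apply_eq (t : List (List Int)) (dcol : Int)
    (hb : ∀ (k : Nat) (_ : k < t.length), ∀ i ∈ pvIdxOf t[k] 1,
      0 ≤ i + dcol ∧ i + dcol < ((t[k]).length : Int)) :
    ((pvCells t 1).foldl (fun t p => pvSetCell t p.1 (p.2 + dcol) 1)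
      ((pvCells t 1).foldl (fun t p => pvSetCell t p.1 p.2 0) t)) = t.map (specRow dcol) := by
  have hL : ∀ p ∈ pvCells t 1, 0 ≤ p.1 ∧ p.1 < (t.length : Int) := by
    intro p hp
    obtain ⟨k, hk, h1, _⟩ := mem_pvCells.mp hp
    constructor
    · rw [h1]; positivity
    · rw [h1]; exact_mod_cast hk
  have hlen : ((pvCells t 1).foldl (fun t p => pvSetCell t p.1 p.2 0) t).length = t.length := by
    simpa using length_foldl_pvSetCell (pvCells t 1) (fun p => p.2) 0 t
  have e1 := foldl_pvSetCell_getElem (pvCells t 1) (fun p => p.2 + dcol) 1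
      ((pvCells t 1).foldl (fun t p => pvSetCell t p.1 p.2 0) t)
      (fun p hp => by rw [hlen]; exact hL p hp)
  have e0 := foldl_pvSetCell_getElem (pvCells t 1) (fun p => p.2) 0 t hL
  apply List.ext_getElem?
  intro k
  simp only at e0 e1
  rw [e1 k, e0 k, Option.map_map, List.getElem?_map]
  by_cases hk : k < t.length
  · rw [List.getElem?_eq_getElem hk, Option.map_some, Option.map_some]
    congr 1
    rw [Function.comp_apply, pvCells_filter_row t 1 k hk]
    exact row_apply_eq dcol t[k] (hb k hk)
  · rw [List.getElem?_eq_none (show t.length ≤ k by omega)]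
    rfl

-- ===== VERDICT (by name: the statement is the Claim_ definition above) =====
theorem jet_move_spec : Claim_equal_jet_move := by
  intro tunnel direction _ hpre
  unfold Spec_jet_move
  by_cases hd : direction = ">"
  · have hbeq : (direction == ">") = true := beq_iff_eq.mpr hd
    have h1 : jet_move tunnel direction = (match pvRows (direction == ">") tunnel with
        | none => tunnel | some t => t) := rfl
    have h2 : jet_move_alt tunnel direction =
        (if (pvCells tunnel 1).any (fun p => p.2 == (if (direction == ">") then (6 : Int) else 0) ||
            PySem.Set.contains (PySem.Set.ofList (pvCells tunnel 2))
              (p.1, p.2 + (if (direction == ">") then (1 : Int) else -1))) then tunnel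
         else (pvCells tunnel 1).foldl
            (fun t p => pvSetCell t p.1 (p.2 + (if (direction == ">") then (1 : Int) else -1)) 1)
            ((pvCells tunnel 1).foldl (fun t p => pvSetCell t p.1 p.2 0) tunnel)) := rfl
    rw [h1, h2, hbeq, pvRows_eq true tunnel (fun _ => hpre hd),
        show (if (true : Bool) = true then (1 : Int) else -1) = 1 from rfl,
        show (if (true : Bool) = true then (6 : Int) else 0) = 6 from rfl,
        alt_blocked_eq tunnel 1 6]
    by_cases hblk : tunnel.any (blockedRowB 1 6)
    · rw [if_pos hblk, if_pos hblk]
    · simp only [Bool.not_eq_true] at hblk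
      rw [if_neg (by simp [hblk]), if_neg (by simp [hblk])]
      have hb : ∀ (k : Nat) (_ : k < tunnel.length), ∀ i ∈ pvIdxOf tunnel[k] 1,
          0 ≤ i + 1 ∧ i + 1 < ((tunnel[k]).length : Int) := by
        intro k hk i hi
        obtain ⟨h0, h1', hv⟩ := cellB_eq_true_iff.mp (mem_pvIdxOf.mp hi)
        refine ⟨by omega, ?_⟩
        have hmem : ((i, tunnel[k][i.toNat]) : Int × Int) ∈ PySem.List.enumerate tunnel[k] 0 := by
          rw [PySem.List.mem_enumerate_iff]
          exact ⟨i.toNat, by omega, by simp; omega⟩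
        have hv' : tunnel[k][i.toNat] = 1 := by
          rw [← PySem.List.pyGetD_eq_getElem tunnel[k] 0 h0 h1']; exact hv
        rcases hpre hd tunnel[k] (List.getElem_mem hk) _ hmem hv' with h | h
        · exact h
        · exfalso
          rw [List.any_eq_false] at hblk
          exact hblk tunnel[k] (List.getElem_mem hk)
            ((blockedRowB_iff 1 6 tunnel[k]).mpr ⟨i, hi, Or.inl h⟩)
      rw [alt_apply_eq tunnel 1 hb]
  · have hbeq : (direction == ">") = false := beq_eq_false_iff_ne.mpr hd
    have h1 : jet_move tunnel direction = (match pvRows (direction == ">") tunnel with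
        | none => tunnel | some t => t) := rfl
    have h2 : jet_move_alt tunnel direction =
        (if (pvCells tunnel 1).any (fun p => p.2 == (if (direction == ">") then (6 : Int) else 0) ||
            PySem.Set.contains (PySem.Set.ofList (pvCells tunnel 2))
              (p.1, p.2 + (if (direction == ">") then (1 : Int) else -1))) then tunnel
         else (pvCells tunnel 1).foldl
            (fun t p => pvSetCell t p.1 (p.2 + (if (direction == ">") then (1 : Int) else -1)) 1)
            ((pvCells tunnel 1).foldl (fun t p => pvSetCell t p.1 p.2 0) tunnel)) := rfl
    rw [h1, h2, hbeq, pvRows_eq false tunnel (fun h => absurd h Bool.false_ne_true),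
        show (if (false : Bool) = true then (1 : Int) else -1) = -1 from rfl,
        show (if (false : Bool) = true then (6 : Int) else 0) = 0 from rfl,
        alt_blocked_eq tunnel (-1) 0]
    by_cases hblk : tunnel.any (blockedRowB (-1) 0)
    · rw [if_pos hblk, if_pos hblk]
    · simp only [Bool.not_eq_true] at hblk
      rw [if_neg (by simp [hblk]), if_neg (by simp [hblk])]
      have hb : ∀ (k : Nat) (_ : k < tunnel.length), ∀ i ∈ pvIdxOf tunnel[k] 1,
          0 ≤ i + -1 ∧ i + -1 < ((tunnel[k]).length : Int) := by
        intro k hk i hi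
        obtain ⟨h0, h1', _⟩ := cellB_eq_true_iff.mp (mem_pvIdxOf.mp hi)
        have hne : i ≠ 0 := by
          intro h
          rw [List.any_eq_false] at hblk
          exact hblk tunnel[k] (List.getElem_mem hk)
            ((blockedRowB_iff (-1) 0 tunnel[k]).mpr ⟨i, hi, Or.inl h⟩)
        constructor <;> omega
      rw [alt_apply_eq tunnel (-1) hb]
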